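-- pv_equiv track=rewrite | github.com/robinhood0107/document-translate-myfix | modules/ocr/hunyuan_ocr.py | _clean_repeated_substrings
-- ===== SOURCE A (Python) =====
-- def _clean_repeated_substrings(text: str) -> str:
--     total_length = len(text or "")
--     if total_length < 8000:
--         return text
--
--     for length in range(2, total_length // 10 + 1):
--         candidate = text[-length:]
--         count = 0
--         index = total_length - length
--
--         while index >= 0 and text[index:index + length] == candidate:
--             count += 1
--             index -= length
--
--         if count >= 10:
--             return text[: total_length - length * (count - 1)]
--
--     return text
-- ===== SOURCE B (Python) =====
-- def _clean_repeated_substrings(text: str) -> str: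
--     n = len(text or "")
--     if n < 8000:
--         return text
--
--     rev = text[::-1]
--     for length in range(2, n // 10 + 1):
--         # k = common prefix length of rev and rev shifted by `length`;
--         # the trailing block of size `length` then repeats 1 + k // length times.
--         k = 0
--         for x, y in zip(rev, rev[length:]):
--             if x != y:
--                 break
--             k += 1
--         reps = k // length
--         if reps >= 9:
--             return text[: n - length * reps]
--
--     return text
-- ===== Notes on version B (the rewrite author's own statement) =====
-- stated objective: alternative
-- what changed: B reverses the string once and, per candidate length, counts the common prefix of the reversed string zipped with its shifted copy (repeat count = 1 + k // length), instead of A's while-loop comparing successive block slices against the trailing candidate.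
import Mathlib
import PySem

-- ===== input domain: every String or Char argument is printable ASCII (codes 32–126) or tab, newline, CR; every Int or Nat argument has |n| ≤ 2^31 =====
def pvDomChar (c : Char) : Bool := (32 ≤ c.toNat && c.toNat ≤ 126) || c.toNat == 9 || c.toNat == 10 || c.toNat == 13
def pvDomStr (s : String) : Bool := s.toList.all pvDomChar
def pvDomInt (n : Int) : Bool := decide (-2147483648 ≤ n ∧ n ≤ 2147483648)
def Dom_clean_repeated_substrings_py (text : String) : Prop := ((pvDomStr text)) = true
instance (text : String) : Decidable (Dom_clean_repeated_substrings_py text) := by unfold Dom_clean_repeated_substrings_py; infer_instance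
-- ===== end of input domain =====

-- B reverses the string once and counts, per candidate length, the common prefix of the
-- reversed string zipped with its shifted copy, instead of A's block-slice counting loop
-- (objective: alternative; same asymptotic cost).

-- ===== PORT A =====
-- inner `while index >= 0 and text[index:index+length] == candidate` loop of A;
-- the `0 < L` conjunct is a totality guard only: every call site passes L ≥ 2 (from range(2, …)).
def pvWhileA (cs : List Char) (L : Int) (cand : List Char) (index : Int) (count : Int) : Int :=
  if h : 0 < L ∧ 0 ≤ index ∧ PySem.List.slice cs (some index) (some (index + L)) = cand then
    pvWhileA cs L cand (index - L) (count + 1)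
  else count
termination_by (index + 1).toNat
decreasing_by omega

-- the `for length in range(...)` loop of A, with Python's early `return` as the first branch
def pvForA (cs : List Char) (n : Int) : List Int → List Char
  | [] => cs
  | L :: rest =>
    let cand := PySem.List.slice cs (some (-L)) none
    let count := pvWhileA cs L cand (n - L) 0
    if count ≥ 10 then PySem.List.slice cs none (some (n - L * (count - 1)))
    else pvForA cs n rest

def clean_repeated_substrings_py (text : String) : String :=
  let cs := text.toList
  let n : Int := cs.length
  if n < 8000 then text
  else String.ofList (pvForA cs n (PySem.List.pyRange 2 (PySem.Int.floordiv n 10 + 1) 1))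

-- ===== PORT B =====
-- B's `for x, y in zip(rev, rev[length:]): if x != y: break; k += 1` loop:
-- the number of equal leading pairs of the zipped lists.
def pvCommonPrefix : List (Char × Char) → Nat
  | [] => 0
  | (x, y) :: rest => if x = y then pvCommonPrefix rest + 1 else 0

def pvForB (cs rev : List Char) (n : Int) : List Int → List Char
  | [] => cs
  | L :: rest =>
    let k : Int := pvCommonPrefix (rev.zip (PySem.List.slice rev (some L) none))
    let reps := PySem.Int.floordiv k L
    if reps ≥ 9 then PySem.List.slice cs none (some (n - L * reps))
    else pvForB cs rev n rest

def clean_repeated_substrings_py_alt (text : String) : String :=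
  let cs := text.toList
  let n : Int := cs.length
  if n < 8000 then text
  else
    let rev := cs.reverse          -- text[::-1]
    String.ofList (pvForB cs rev n (PySem.List.pyRange 2 (PySem.Int.floordiv n 10 + 1) 1))

-- ===== PRECONDITION & SPEC =====
def Spec_clean_repeated_substrings_py (text : String) (out : String) : Prop := out = clean_repeated_substrings_py_alt text
instance (text : String) (out : String) : Decidable (Spec_clean_repeated_substrings_py text out) := by unfold Spec_clean_repeated_substrings_py; infer_instance

-- ===== CLAIM (what is proved, stated in full; the proofs are below) =====
def Claim_equal_clean_repeated_substrings_py : Prop := ∀ (text : String), Dom_clean_repeated_substrings_py text → Spec_clean_repeated_substrings_py text (clean_repeated_substrings_py text)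

-- ===== LEMMAS AND PROOFS =====

-- `charOK cs L n i` : the i-th character comparison of B's scan succeeds (in Nat form)
def charOK (cs : List Char) (L n i : Nat) : Prop :=
  i + L < n ∧ cs[n - 1 - i]? = cs[n - 1 - L - i]?

-- `blockOK cs L n j` : the j-th block comparison of A's loop succeeds (guard of pvWhileA, in Nat form)
def blockOK (cs : List Char) (L n j : Nat) : Prop :=
  (j + 1) * L ≤ n ∧ (cs.drop (n - (j + 1) * L)).take L = cs.drop (n - L)

-- pvCommonPrefix of a zip = the least index where the two lists stop agreeing
theorem pvCommonPrefix_spec (a b : List Char) (K : Nat)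
    (h1 : ∀ i, i < K → i < a.length ∧ i < b.length ∧ a[i]? = b[i]?)
    (h2 : ¬ (K < a.length ∧ K < b.length ∧ a[K]? = b[K]?)) :
    pvCommonPrefix (a.zip b) = K := by
  induction a generalizing b K with
  | nil =>
    have : K = 0 := by
      by_contra h
      have := (h1 0 (by omega)).1
      simp at this
    simp [pvCommonPrefix, this]
  | cons x xs ih =>
    cases b with
    | nil =>
      have : K = 0 := by
        by_contra h
        have := (h1 0 (by omega)).2.1
        simp at this
      simp [pvCommonPrefix, this]
    | cons y ys =>
      cases K with
      | zero =>
        have hne : x ≠ y := by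
          intro he
          exact h2 ⟨by simp, by simp, by simp [he]⟩
        simp [List.zip, pvCommonPrefix, hne]
      | succ K' =>
        have hxy : x = y := by
          have := (h1 0 (by omega)).2.2
          simpa using this
        have hrec : pvCommonPrefix (xs.zip ys) = K' := by
          apply ih
          · intro i hi
            have := h1 (i + 1) (by omega)
            simpa using this
          · intro ⟨ha, hb, he⟩
            exact h2 ⟨by simpa using ha, by simpa using hb, by simpa using he⟩
        simp [List.zip, pvCommonPrefix, hxy]
        exact hrec

theorem pvWhileA_spec (cs : List Char) (L n : Nat) (hL : 1 ≤ L) (hn : n = cs.length)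
    (M : Nat) (h1 : ∀ j, j < M → blockOK cs L n j) (h2 : ¬ blockOK cs L n M) :
    ∀ j, j ≤ M →
      pvWhileA cs (L : Int) (cs.drop (n - L)) ((n : Int) - L - j * L) (j : Int) = (M : Int) := by
  intro j hj
  induction hm : M - j generalizing j with
  | zero =>
    have hjM : j = M := by omega
    rw [hjM, pvWhileA, dif_neg]
    rintro ⟨-, hge, hsl⟩
    apply h2
    have hc : ((M * L : Nat) : Int) = (M : Int) * (L : Int) := by push_cast; ring
    have hsm : (M + 1) * L = M * L + L := by ring
    have hble : (M + 1) * L ≤ n := by omega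
    refine ⟨hble, ?_⟩
    rw [show ((n : Int) - L - M * L) = ((n - (M + 1) * L : Nat) : Int) from by omega] at hsl
    rwa [PySem.List.slice_natCast_add] at hsl
  | succ m ih =>
    have hjM : j < M := by omega
    obtain ⟨hble, hsl⟩ := h1 j hjM
    have hc : ((j * L : Nat) : Int) = (j : Int) * (L : Int) := by push_cast; ring
    have hsm : (j + 1) * L = j * L + L := by ring
    rw [pvWhileA, dif_pos]
    · rw [show ((n : Int) - L - j * L - L) = ((n : Int) - L - ((j + 1 : Nat) : Int) * L) from by
          push_cast; ring,
        show ((j : Int) + 1) = ((j + 1 : Nat) : Int) from by push_cast; ring]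
      exact ih (j + 1) (by omega) (by omega)
    · refine ⟨by exact_mod_cast hL, by omega, ?_⟩
      rw [show ((n : Int) - L - j * L) = ((n - (j + 1) * L : Nat) : Int) from by omega]
      rwa [PySem.List.slice_natCast_add]

-- a block comparison, element by element
theorem blockOK_iff (cs : List Char) (L n j : Nat) (hn : n = cs.length) (hL : 1 ≤ L)
    (hble : (j + 1) * L ≤ n) :
    ((cs.drop (n - (j + 1) * L)).take L = cs.drop (n - L)) ↔
      (∀ c, c < L → cs[n - (j + 1) * L + c]? = cs[n - L + c]?) := by
  have hsm : (j + 1) * L = j * L + L := by ring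
  constructor
  · intro hEq c hc
    have h1 : ((cs.drop (n - (j + 1) * L)).take L)[c]? = cs[n - (j + 1) * L + c]? := by
      rw [List.getElem?_take_of_lt hc, List.getElem?_drop]
    have h2 : (cs.drop (n - L))[c]? = cs[n - L + c]? := List.getElem?_drop ..
    rw [← h1, ← h2, hEq]
  · intro hAll
    apply List.ext_getElem?
    intro c
    by_cases hc : c < L
    · rw [List.getElem?_take_of_lt hc, List.getElem?_drop, List.getElem?_drop]
      exact hAll c hc
    · rw [List.getElem?_eq_none, List.getElem?_eq_none]
      · simp only [List.length_drop]; omega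
      · simp only [List.length_take, List.length_drop]; omega

-- stepping a local period of length L along the list
theorem chainPeriod (cs : List Char) (L n t : Nat) (hn : n = cs.length)
    (Hper : ∀ p, t ≤ p → p + L < n → cs[p]? = cs[p + L]?) :
    ∀ s p, t ≤ p → p + s * L < n → cs[p]? = cs[p + s * L]? := by
  intro s
  induction s with
  | zero => intro p _ _; simp
  | succ s ih =>
    intro p hp hlt
    have hsm : (s + 1) * L = s * L + L := by ring
    have h1 : cs[p]? = cs[p + L]? := Hper p hp (by omega)
    have h2 : cs[p + L]? = cs[p + L + s * L]? := ih (p + L) (by omega) (by omega)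
    rw [h1, h2]
    congr 1
    omega

-- if B's scan succeeds K times, every block up to index K / L matches
theorem blocks_of_chars (cs : List Char) (L n K : Nat) (hn : n = cs.length) (hL : 1 ≤ L)
    (hLn : L ≤ n) (hK1 : ∀ i, i < K → charOK cs L n i) (hKn : K + L ≤ n) :
    ∀ j, j * L ≤ K → blockOK cs L n j := by
  have Hper : ∀ p, n - L - K ≤ p → p + L < n → cs[p]? = cs[p + L]? := by
    intro p hp hpL
    obtain ⟨-, he⟩ := hK1 (n - 1 - L - p) (by omega)
    have e1 : n - 1 - (n - 1 - L - p) = p + L := by omega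
    have e2 : n - 1 - L - (n - 1 - L - p) = p := by omega
    rw [e1, e2] at he
    exact he.symm
  intro j hjK
  have hsm : (j + 1) * L = j * L + L := by ring
  have hble : (j + 1) * L ≤ n := by omega
  refine ⟨hble, (blockOK_iff cs L n j hn hL hble).2 ?_⟩
  intro c hc
  have h := chainPeriod cs L n (n - L - K) hn Hper j (n - (j + 1) * L + c)
    (by omega) (by omega)
  rw [h]
  congr 1
  omega

-- if A's loop succeeds on every block below M, B's scan succeeds up to (M-1)·L
theorem chars_of_blocks (cs : List Char) (L n M : Nat) (hn : n = cs.length) (hL : 1 ≤ L)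
    (hM1 : ∀ j, j < M → blockOK cs L n j) :
    ∀ j, j < M → ∀ i, i < j * L → charOK cs L n i := by
  intro j
  induction j with
  | zero => intro _ i hi; omega
  | succ j ih =>
    intro hjM i hi
    by_cases hij : i < j * L
    · exact ih (by omega) i hij
    · have hsm1 : (j + 1) * L = j * L + L := by ring
      have hsm2 : (j + 1 + 1) * L = j * L + L + L := by ring
      obtain ⟨hble1, heq1⟩ := hM1 j (by omega)
      obtain ⟨hble2, heq2⟩ := hM1 (j + 1) hjM
      have hc : (j + 1) * L - 1 - i < L := by omega
      have e1 := (blockOK_iff cs L n j hn hL hble1).1 heq1 ((j + 1) * L - 1 - i) hc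
      have e2 := (blockOK_iff cs L n (j + 1) hn hL hble2).1 heq2 ((j + 1) * L - 1 - i) hc
      have f1 : n - (j + 1) * L + ((j + 1) * L - 1 - i) = n - 1 - i := by omega
      have f2 : n - (j + 1 + 1) * L + ((j + 1) * L - 1 - i) = n - 1 - L - i := by omega
      rw [f1] at e1
      rw [f2] at e2
      exact ⟨by omega, e1.trans e2.symm⟩

-- the two stopping points determine each other: A stops after 1 + K / L successful blocks
theorem M_eq_succ_div (cs : List Char) (L n K M : Nat) (hn : n = cs.length) (hL : 1 ≤ L)
    (h10 : 10 * L ≤ n)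
    (hK1 : ∀ i, i < K → charOK cs L n i) (hK2 : ¬ charOK cs L n K)
    (hM1 : ∀ j, j < M → blockOK cs L n j) (hM2 : ¬ blockOK cs L n M) :
    M = K / L + 1 := by
  have hL0 : 0 < L := hL
  have hKn : K + L ≤ n := by
    rcases Nat.eq_zero_or_pos K with h0 | hpos
    · omega
    · have := (hK1 (K - 1) (by omega)).1
      omega
  have hMub : K / L < M := by
    by_contra hcon
    apply hM2
    refine blocks_of_chars cs L n K hn hL (by omega) hK1 hKn M ?_
    exact le_trans (Nat.mul_le_mul_right L (not_lt.mp hcon)) (Nat.div_mul_le_self K L)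
  have hMpos : 0 < M := Nat.lt_of_le_of_lt (Nat.zero_le _) hMub
  have hKlb : (M - 1) * L ≤ K := by
    by_contra hcon
    exact hK2 (chars_of_blocks cs L n M hn hL hM1 (M - 1) (by omega) K (by omega))
  have hdivlb : M - 1 ≤ K / L := (Nat.le_div_iff_mul_le hL0).2 hKlb
  generalize hgen : K / L = q at hMub hdivlb ⊢
  omega

-- B's common-prefix count over the reversed string equals the character-comparison count K
theorem commonPrefix_eq (cs : List Char) (L K : Nat) (hL : 1 ≤ L)
    (hK1 : ∀ i, i < K → charOK cs L cs.length i) (hK2 : ¬ charOK cs L cs.length K) :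
    pvCommonPrefix (cs.reverse.zip (PySem.List.slice cs.reverse (some (L : Int)) none)) = K := by
  rw [PySem.List.slice_from_natCast]
  set n := cs.length with hn
  have hrevlen : cs.reverse.length = n := by simp [hn]
  have hget : ∀ i, i < n → cs.reverse[i]? = cs[n - 1 - i]? := by
    intro i hi
    rw [List.getElem?_reverse (by omega)]
  apply pvCommonPrefix_spec
  · intro i hi
    obtain ⟨hlt, he⟩ := hK1 i hi
    refine ⟨by omega, by simp [hrevlen]; omega, ?_⟩
    rw [List.getElem?_drop, hget i (by omega), hget (L + i) (by omega)]
    rw [show n - 1 - (L + i) = n - 1 - L - i from by omega]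
    exact he
  · rintro ⟨ha, hb, he⟩
    have hbn : K + L < n := by
      have := hb
      simp [hrevlen] at this
      omega
    apply hK2
    refine ⟨hbn, ?_⟩
    rw [List.getElem?_drop, hget K (by omega), hget (L + K) (by omega)] at he
    rw [show n - 1 - (L + K) = n - 1 - L - K from by omega] at he
    exact he

theorem perLength (cs : List Char) (L : Nat) (hL : 1 ≤ L) (hn : 10 * L ≤ cs.length) :
    pvWhileA cs (L : Int) (PySem.List.slice cs (some (-(L : Int))) none)
        ((cs.length : Int) - L) 0
      = PySem.Int.floordiv
          ((pvCommonPrefix (cs.reverse.zip (PySem.List.slice cs.reverse (some (L : Int)) none)) : Nat) : Int)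
          (L : Int) + 1 := by
  have hL0 : 0 < L := hL
  haveI : DecidablePred fun i => ¬ charOK cs L cs.length i := fun i => Classical.dec _
  haveI : DecidablePred fun j => ¬ blockOK cs L cs.length j := fun j => Classical.dec _
  have hex : ∃ i, ¬ charOK cs L cs.length i := ⟨cs.length, fun h => by have := h.1; omega⟩
  have hexB : ∃ j, ¬ blockOK cs L cs.length j := by
    refine ⟨cs.length, fun h => ?_⟩
    have h1 := h.1
    have h2 : cs.length + 1 ≤ (cs.length + 1) * L := Nat.le_mul_of_pos_right _ hL0
    omega
  have hK2 : ¬ charOK cs L cs.length (Nat.find hex) := Nat.find_spec hex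
  have hK1 : ∀ i, i < Nat.find hex → charOK cs L cs.length i := fun i hi =>
    not_not.mp (Nat.find_min hex hi)
  have hM2 : ¬ blockOK cs L cs.length (Nat.find hexB) := Nat.find_spec hexB
  have hM1 : ∀ j, j < Nat.find hexB → blockOK cs L cs.length j := fun j hj =>
    not_not.mp (Nat.find_min hexB hj)
  have hM : Nat.find hexB = Nat.find hex / L + 1 :=
    M_eq_succ_div cs L cs.length (Nat.find hex) (Nat.find hexB) rfl hL hn hK1 hK2 hM1 hM2
  have hA := pvWhileA_spec cs L cs.length hL rfl (Nat.find hexB) hM1 hM2 0 (by omega)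
  have hB := commonPrefix_eq cs L (Nat.find hex) hL hK1 hK2
  rw [PySem.List.slice_from_neg_natCast cs L hL0]
  simp only [Nat.cast_zero, zero_mul, sub_zero] at hA
  rw [hA, hB, PySem.Int.floordiv_natCast, hM]
  push_cast
  ring

theorem forAB (cs : List Char) (Ls : List Int)
    (h : ∀ L ∈ Ls, 2 ≤ L ∧ 10 * L ≤ (cs.length : Int)) :
    pvForA cs (cs.length : Int) Ls = pvForB cs cs.reverse (cs.length : Int) Ls := by
  induction Ls with
  | nil => rfl
  | cons L rest ih =>
    obtain ⟨hL2, h10⟩ := h L (List.mem_cons_self ..)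
    have hrest : ∀ L' ∈ rest, 2 ≤ L' ∧ 10 * L' ≤ (cs.length : Int) := fun L' hm =>
      h L' (List.mem_cons_of_mem _ hm)
    obtain ⟨Ln, rfl⟩ : ∃ m : Nat, L = (m : Int) := ⟨L.toNat, by omega⟩
    have hLn : 1 ≤ Ln := by omega
    have h10n : 10 * Ln ≤ cs.length := by exact_mod_cast h10
    have hper := perLength cs Ln hLn h10n
    simp only [pvForA, pvForB]
    rw [hper]
    by_cases hge : PySem.Int.floordiv
        ((pvCommonPrefix (cs.reverse.zip (PySem.List.slice cs.reverse (some (Ln : Int)) none)) : Nat) : Int)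
        (Ln : Int) ≥ 9
    · rw [if_pos (by omega), if_pos hge]
      congr 2
      ring
    · rw [if_neg (by omega), if_neg hge]
      exact ih hrest

-- ===== VERDICT (by name: the statement is the Claim_ definition above) =====
theorem clean_repeated_substrings_py_spec : Claim_equal_clean_repeated_substrings_py := by
  intro text _
  unfold Spec_clean_repeated_substrings_py
  simp only [clean_repeated_substrings_py, clean_repeated_substrings_py_alt]
  by_cases h8 : ((text.toList.length : Int) < 8000)
  · rw [if_pos h8, if_pos h8]
  · rw [if_neg h8, if_neg h8]
    congr 1
    apply forAB
    intro L hm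
    rw [PySem.List.mem_pyRange_one] at hm
    obtain ⟨h2, hlt⟩ := hm
    refine ⟨h2, ?_⟩
    have hdiv : L ≤ PySem.Int.floordiv (text.toList.length : Int) 10 := by omega
    have := (PySem.Int.le_floordiv_iff_mul_le (show (0:Int) < 10 by norm_num)).1 hdiv
    omega
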